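-- pv_equiv track=rewrite | github.com/schlogl2017/BioinfoCourse | genomes.py | get_bases_stats
-- ===== SOURCE A (Python) =====
-- from collections import Counter, defaultdict
--
-- def get_bases_stats(sequence, alphabet, start):
--     """Returns the base statistics from different strands of a bacterial chromossome.
--     It shows the difference in C e G composition in the lagg and lead strand"""
--     seq = sequence.upper()
--     seq_len = len(seq)
--     half_seq = seq_len // 2
--     ter = start + half_seq
--     # as a circular genome
--     if ter > seq_len:
--         ter = ter - seq_len + 1
--     counts = defaultdict(int)
--     for base in alphabet:
--         total = seq.count(base)
--         if ter > start:  # start ---> ter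
--             f_count = seq[start:ter].count(base)
--             r_count = total - f_count
--         else:  # ter ---> start
--             r_count = seq[ter:start].count(base)
--             f_count = total - r_count
--         counts[base] = (total, f_count, r_count)
--     return counts
-- ===== SOURCE B (Python) =====
-- def get_bases_stats(sequence, alphabet, start):
--     """One pass over the sequence with a position-indexed dict instead of
--     per-base .count() rescans; same result as A."""
--     seq = sequence.upper()
--     n = len(seq)
--     ter = start + n // 2
--     if ter > n:
--         ter = ter - n + 1
--     fwd = ter > start
--     lo, hi, _ = slice(start, ter).indices(n) if fwd else slice(ter, start).indices(n)
--     stats = {}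
--     for b in alphabet:
--         if b not in stats:
--             stats[b] = [0, 0]
--     for i, c in enumerate(seq):
--         if c in stats:
--             st = stats[c]
--             st[0] += 1
--             if lo <= i < hi:
--                 st[1] += 1
--     if fwd:
--         return {b: (t, f, t - f) for b, (t, f) in stats.items()}
--     return {b: (t, t - r, r) for b, (t, r) in stats.items()}
-- ===== Notes on version B (the rewrite author's own statement) =====
-- stated objective: faster
-- what changed: Replaces per-base str.count rescans of the sequence and the slice with a dict pre-seeded from the alphabet and a single enumerate pass that tallies total and in-window counts per character, using slice().indices for the window bounds.
import Mathlib
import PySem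

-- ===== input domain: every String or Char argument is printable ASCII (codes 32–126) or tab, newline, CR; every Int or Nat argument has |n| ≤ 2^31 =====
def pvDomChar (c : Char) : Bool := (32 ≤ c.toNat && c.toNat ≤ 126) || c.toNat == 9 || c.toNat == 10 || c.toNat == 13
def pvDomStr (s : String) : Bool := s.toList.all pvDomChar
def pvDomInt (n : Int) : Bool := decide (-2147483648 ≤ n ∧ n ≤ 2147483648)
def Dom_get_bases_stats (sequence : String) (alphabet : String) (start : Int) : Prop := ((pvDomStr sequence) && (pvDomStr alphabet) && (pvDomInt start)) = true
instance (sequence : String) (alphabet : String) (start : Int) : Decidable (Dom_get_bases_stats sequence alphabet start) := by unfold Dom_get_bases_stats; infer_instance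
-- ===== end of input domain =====

-- B replaces A's per-base .count() rescans by one enumerate pass over the sequence with a
-- pre-seeded dict (objective: faster; O(n+|alphabet|) instead of O(|alphabet|*n)).

-- ===== PORT A =====
def get_bases_stats (sequence : String) (alphabet : String) (start : Int) : List (String × Int × Int × Int) :=
  let seq : List Char := PySem.Chars.upper sequence.toList
  let seq_len : Int := (seq.length : Int)
  let half_seq : Int := PySem.Int.floordiv seq_len 2
  let ter0 : Int := start + half_seq
  let ter : Int := if ter0 > seq_len then ter0 - seq_len + 1 else ter0
  let counts : PySem.Dict String (Int × Int × Int) :=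
    alphabet.toList.foldl (fun d base =>
      let total : Int := (PySem.Chars.count seq [base] : Int)
      if ter > start then
        let f_count : Int := (PySem.Chars.count (PySem.List.slice seq (some start) (some ter)) [base] : Int)
        let r_count : Int := total - f_count
        d.insert (String.ofList [base]) (total, f_count, r_count)
      else
        let r_count : Int := (PySem.Chars.count (PySem.List.slice seq (some ter) (some start)) [base] : Int)
        let f_count : Int := total - r_count
        d.insert (String.ofList [base]) (total, f_count, r_count)) PySem.Dict.empty
  counts.items

-- ===== PORT B =====
def get_bases_stats_alt (sequence : String) (alphabet : String) (start : Int) : List (String × Int × Int × Int) :=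
  let seq : List Char := PySem.Chars.upper sequence.toList
  let n : Int := (seq.length : Int)
  let ter0 : Int := start + PySem.Int.floordiv n 2
  let ter : Int := if ter0 > n then ter0 - n + 1 else ter0
  let fwd : Bool := decide (ter > start)
  -- Python's slice(a, b).indices(len(seq)) with step 1 is (clampIdx, clampIdx, 1): exact
  let lo : Int := if fwd then (PySem.List.clampIdx seq.length start : Int) else (PySem.List.clampIdx seq.length ter : Int)
  let hi : Int := if fwd then (PySem.List.clampIdx seq.length ter : Int) else (PySem.List.clampIdx seq.length start : Int)
  let stats : PySem.Dict Char (Int × Int) :=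
    alphabet.toList.foldl (fun d b => if d.contains b then d else d.insert b (0, 0)) PySem.Dict.empty
  let stats2 : PySem.Dict Char (Int × Int) :=
    (PySem.List.enumerate seq).foldl
      (fun d p =>
        if d.contains p.2 then
          d.modify p.2 (0, 0) (fun st => (st.1 + 1, if lo ≤ p.1 ∧ p.1 < hi then st.2 + 1 else st.2))
        else d) stats
  if fwd then
    stats2.items.map (fun q => (String.ofList [q.1], q.2.1, q.2.2, q.2.1 - q.2.2))
  else
    stats2.items.map (fun q => (String.ofList [q.1], q.2.1, q.2.1 - q.2.2, q.2.2))

-- ===== PRECONDITION & SPEC =====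
def Spec_get_bases_stats (sequence : String) (alphabet : String) (start : Int) (out : List (String × Int × Int × Int)) : Prop := out = get_bases_stats_alt sequence alphabet start
instance (sequence : String) (alphabet : String) (start : Int) (out : List (String × Int × Int × Int)) : Decidable (Spec_get_bases_stats sequence alphabet start out) := by unfold Spec_get_bases_stats; infer_instance

-- ===== CLAIM (what is proved, stated in full; the proofs are below) =====
def Claim_equal_get_bases_stats : Prop := ∀ (sequence : String) (alphabet : String) (start : Int), Dom_get_bases_stats sequence alphabet start → Spec_get_bases_stats sequence alphabet start (get_bases_stats sequence alphabet start)

-- ===== LEMMAS AND PROOFS =====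

theorem pv_count_go_singleton (c : Char) : ∀ (l : List Char) (fuel acc : Nat), l.length ≤ fuel →
    PySem.Chars.count.go [c] fuel l acc = acc + l.count c := by
  intro l
  induction l with
  | nil => intro fuel acc _; cases fuel <;> simp [PySem.Chars.count.go]
  | cons h t ih =>
    intro fuel acc hf
    cases fuel with
    | zero => simp at hf
    | succ f =>
      simp only [PySem.Chars.count.go, List.isPrefixOf, List.count_cons]
      by_cases hc : c = h
      · subst hc
        simp only [BEq.rfl, Bool.and_true]
        simp [ih f (acc + 1) (by simpa using hf)]
        omega
      · have h1 : (c == h) = false := by simp [hc]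
        have h2 : (h == c) = false := by simp [Ne.symm hc]
        simp [h1, h2, ih f acc (by simpa using hf)]

theorem pv_countP_enum_total (c : Char) : ∀ (s : List Char) (k : Int),
    (PySem.List.enumerate s k).countP (fun p => p.2 == c) = s.count c := by
  intro s
  induction s with
  | nil => intro k; simp [PySem.List.enumerate_nil]
  | cons h t ih =>
    intro k
    simp [PySem.List.enumerate_cons, List.countP_cons, ih, List.count_cons]

theorem pv_count_singleton (s : List Char) (c : Char) :
    PySem.Chars.count s [c] = s.count c := by
  simp [PySem.Chars.count, pv_count_go_singleton c s s.length 0 le_rfl]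

theorem pv_countP_enum_window (c : Char) : ∀ (s : List Char) (k lo hi : Int),
    (PySem.List.enumerate s k).countP
        (fun p => p.2 == c && decide (lo ≤ p.1 ∧ p.1 < hi))
      = ((s.drop ((lo - k).toNat)).take ((hi - k).toNat - (lo - k).toNat)).count c := by
  intro s
  induction s with
  | nil => intro k lo hi; simp [PySem.List.enumerate_nil]
  | cons h t ih =>
    intro k lo hi
    rw [PySem.List.enumerate_cons, List.countP_cons, ih (k+1) lo hi]
    by_cases hlo : lo ≤ k
    · have e1 : (lo - k).toNat = 0 := by omega
      have e2 : (lo - (k+1)).toNat = 0 := by omega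
      by_cases hhi : k < hi
      · have e3 : (hi - k).toNat = (hi - (k+1)).toNat + 1 := by omega
        simp only [e1, e2, e3, List.drop_zero, Nat.sub_zero, List.take_succ_cons,
          List.count_cons]
        have : (decide (lo ≤ k ∧ k < hi)) = true := by simp [hlo, hhi]
        simp [this]
      · have e3 : (hi - k).toNat = 0 := by omega
        have e4 : (hi - (k+1)).toNat = 0 := by omega
        have : (decide (lo ≤ k ∧ k < hi)) = false := by simp; omega
        simp [e1, e2, e3, e4, this]
    · have e1 : (lo - k).toNat = (lo - (k+1)).toNat + 1 := by omega
      have hcond : (decide (lo ≤ k ∧ k < hi)) = false := by simp; omega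
      simp [e1, hcond, List.drop_succ_cons]
      have e5 : (hi - k).toNat - ((lo - (k + 1)).toNat + 1) = (hi - (k + 1)).toNat - (lo - (k + 1)).toNat := by omega
      rw [e5]

theorem pv_keys_insert {κ ν : Type} [BEq κ] [LawfulBEq κ] (d : PySem.Dict κ ν) (k : κ) (v : ν) :
    (d.insert k v).keys = PySem.Set.add d.keys k := by
  by_cases hc : d.contains k = true
  · rw [PySem.Set.add_of_mem ((PySem.Dict.contains_iff_mem_keys d k).mp hc)]
    simp only [PySem.Dict.keys, PySem.Dict.items_insert, hc, if_true, List.map_map]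
    apply List.map_congr_left
    intro p _
    by_cases hpk : (p.1 == k) = true <;> simp [hpk]
    exact (eq_of_beq hpk).symm
  · have : k ∉ d.keys := fun hm => hc ((PySem.Dict.contains_iff_mem_keys d k).mpr hm)
    rw [PySem.Set.add_of_not_mem this]
    simp [PySem.Dict.keys, PySem.Dict.items_insert, hc]

-- seed fold: keys

theorem pv_seed_keys {ν : Type} (z : ν) : ∀ (l : List Char) (d : PySem.Dict Char ν),
    (l.foldl (fun d b => if d.contains b then d else d.insert b z) d).keys
      = PySem.Set.update d.keys l := by
  intro l
  induction l with
  | nil => intro d; simp [PySem.Set.update]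
  | cons a t ih =>
    intro d
    rw [List.foldl_cons, PySem.Set.update_cons]
    by_cases hc : d.contains a = true
    · rw [if_pos hc, ih, PySem.Set.add_of_mem ((PySem.Dict.contains_iff_mem_keys d a).mp hc)]
    · rw [if_neg hc, ih, pv_keys_insert]

-- seed fold: every stored value is z

theorem pv_seed_getD {ν : Type} (z : ν) : ∀ (l : List Char) (d : PySem.Dict Char ν),
    (∀ b, d.getD b z = z) → ∀ b,
    (l.foldl (fun d b => if d.contains b then d else d.insert b z) d).getD b z = z := by
  intro l
  induction l with
  | nil => intro d h b; simpa using h b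
  | cons a t ih =>
    intro d h b
    rw [List.foldl_cons]
    by_cases hc : d.contains a = true
    · rw [if_pos hc]; exact ih d h b
    · rw [if_neg hc]
      refine ih _ (fun b' => ?_) b
      rw [PySem.Dict.getD_insert]
      by_cases hba : b' = a <;> simp [hba, h b']

theorem pv_insertfold_getD_notmem {κ ν β : Type} [BEq κ] [LawfulBEq κ] [DecidableEq κ]
    (key : β → κ) (v : β → ν) : ∀ (l : List β) (d : PySem.Dict κ ν) (j : κ) (d0 : ν),
    j ∉ l.map key →
    (l.foldl (fun d x => d.insert (key x) (v x)) d).getD j d0 = d.getD j d0 := by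
  intro l
  induction l with
  | nil => intro d j d0 _; rfl
  | cons a t ih =>
    intro d j d0 hj
    simp only [List.map_cons, List.mem_cons, not_or] at hj
    rw [List.foldl_cons, ih _ j d0 hj.2, PySem.Dict.getD_insert, if_neg hj.1]

theorem pv_insertfold_getD_mem {κ ν β : Type} [BEq κ] [LawfulBEq κ] [DecidableEq κ]
    (key : β → κ) (v : β → ν) (hinj : Function.Injective key) :
    ∀ (l : List β) (d : PySem.Dict κ ν) (b : β) (d0 : ν), b ∈ l →
    (l.foldl (fun d x => d.insert (key x) (v x)) d).getD (key b) d0 = v b := by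
  intro l
  induction l with
  | nil => intro d b d0 h; simp at h
  | cons a t ih =>
    intro d b d0 hb
    rw [List.foldl_cons]
    by_cases hbt : b ∈ t
    · exact ih _ b d0 hbt
    · have hba : b = a := (List.mem_cons.mp hb).resolve_right hbt
      subst hba
      have : key b ∉ t.map key := by
        intro hm
        rcases List.mem_map.mp hm with ⟨x, hx, hkx⟩
        exact hbt (hinj hkx ▸ hx)
      rw [pv_insertfold_getD_notmem key v t _ _ _ this, PySem.Dict.getD_insert, if_pos rfl]

-- injective map through Set.update / ofList

theorem pv_update_map {κ κ' : Type} [BEq κ] [LawfulBEq κ] [BEq κ'] [LawfulBEq κ']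
    (f : κ → κ') (hinj : Function.Injective f) :
    ∀ (l : List κ) (s : List κ),
    PySem.Set.update (s.map f) (l.map f) = (PySem.Set.update s l).map f := by
  intro l
  induction l with
  | nil => intro s; simp [PySem.Set.update]
  | cons a t ih =>
    intro s
    simp only [List.map_cons, PySem.Set.update_cons]
    rw [← ih]
    congr 1
    by_cases hm : a ∈ s
    · rw [PySem.Set.add_of_mem hm, PySem.Set.add_of_mem (List.mem_map_of_mem hm)]
    · rw [PySem.Set.add_of_not_mem hm, PySem.Set.add_of_not_mem (by
        intro hc; rcases List.mem_map.mp hc with ⟨x, hx, hfx⟩; exact hm (hinj hfx ▸ hx))]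
      simp

theorem pv_ofList_map {κ κ' : Type} [BEq κ] [LawfulBEq κ] [BEq κ'] [LawfulBEq κ']
    (f : κ → κ') (hinj : Function.Injective f) (l : List κ) :
    PySem.Set.ofList (l.map f) = (PySem.Set.ofList l).map f := by
  rw [PySem.Set.ofList_eq_foldl, PySem.Set.ofList_eq_foldl, ← PySem.Set.update_eq_foldl,
    ← PySem.Set.update_eq_foldl]
  simpa using pv_update_map f hinj l []

theorem pv_phase2_keys (lo hi : Int) : ∀ (l : List (Int × Char)) (d : PySem.Dict Char (Int × Int)),
    (l.foldl (fun d p => if d.contains p.2 then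
        d.modify p.2 (0,0) (fun st => (st.1 + 1, if lo ≤ p.1 ∧ p.1 < hi then st.2 + 1 else st.2))
      else d) d).keys = d.keys := by
  intro l
  induction l with
  | nil => intro d; rfl
  | cons p t ih =>
    intro d
    rw [List.foldl_cons]
    by_cases hc : d.contains p.2 = true
    · rw [if_pos hc, ih, PySem.Dict.keys_modify, pv_keys_insert,
        PySem.Set.add_of_mem ((PySem.Dict.contains_iff_mem_keys d p.2).mp hc)]
    · rw [if_neg hc, ih]

theorem pv_phase2_getD (lo hi : Int) : ∀ (l : List (Int × Char)) (d : PySem.Dict Char (Int × Int)) (b : Char),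
    d.contains b = true →
    (l.foldl (fun d p => if d.contains p.2 then
        d.modify p.2 (0,0) (fun st => (st.1 + 1, if lo ≤ p.1 ∧ p.1 < hi then st.2 + 1 else st.2))
      else d) d).getD b (0,0)
      = ((d.getD b (0,0)).1 + (l.countP (fun p => p.2 == b) : Int),
         (d.getD b (0,0)).2 + (l.countP (fun p => p.2 == b && decide (lo ≤ p.1 ∧ p.1 < hi)) : Int)) := by
  intro l
  induction l with
  | nil => intro d b _; simp
  | cons p t ih =>
    intro d b hb
    rw [List.foldl_cons, List.countP_cons, List.countP_cons]
    by_cases hc : d.contains p.2 = true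
    · rw [if_pos hc]
      have hb' : (d.modify p.2 (0,0) (fun st => (st.1 + 1, if lo ≤ p.1 ∧ p.1 < hi then st.2 + 1 else st.2))).contains b = true := by
        rw [PySem.Dict.contains_modify]
        by_cases hbp : b = p.2 <;> simp [hbp, hc, hb]
      rw [ih _ b hb', PySem.Dict.getD_modify]
      by_cases hbp : b = p.2
      · subst hbp
        rw [if_pos rfl]
        by_cases hr : lo ≤ p.1 ∧ p.1 < hi
        · simp [hr]
          constructor <;> ring
        · simp [hr]
          ring
      · have h1 : (p.2 == b) = false := by simp [Ne.symm hbp]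
        rw [if_neg hbp]
        simp [h1]
    · rw [if_neg hc]
      have hbp : (p.2 == b) = false := by
        by_cases h : p.2 = b
        · subst h; exact absurd hb (by simp [hc])
        · simp [h]
      rw [ih _ b hb]
      simp [hbp]

theorem pv_key_inj : Function.Injective (fun b : Char => String.ofList [b]) := by
  intro a b h
  have := congrArg String.toList h
  simp only [String.toList_ofList, List.cons.injEq] at this
  exact this.1


theorem pv_A_items {ν : Type} (A : List Char) (v : Char → ν) :
    (A.foldl (fun d base => d.insert (String.ofList [base]) (v base)) PySem.Dict.empty).items
      = (PySem.Set.ofList A).map (fun b => (String.ofList [b], v b)) := by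
  have hnd : (A.foldl (fun d base => d.insert (String.ofList [base]) (v base)) PySem.Dict.empty).keys.Nodup := by
    apply PySem.Dict.nodup_keys_foldl_insert_key A (fun base => String.ofList [base]) (fun _ base => v base)
    simp [PySem.Dict.keys_empty]
  have hkeys : (A.foldl (fun d base => d.insert (String.ofList [base]) (v base)) PySem.Dict.empty).keys
      = (PySem.Set.ofList A).map (fun b => String.ofList [b]) := by
    rw [PySem.Dict.keys_foldl_insert_key A (fun base => String.ofList [base]) (fun _ base => v base),
      PySem.Dict.keys_empty, PySem.Set.update_nil_left, pv_ofList_map _ pv_key_inj]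
  obtain ⟨w⟩ : Nonempty ν := ⟨v 'A'⟩
  rw [PySem.Dict.items_eq_map_keys _ hnd w, hkeys, List.map_map]
  apply List.map_congr_left
  intro b hb
  simp only [Function.comp]
  rw [pv_insertfold_getD_mem (fun base => String.ofList [base]) v pv_key_inj A _ b w
    ((PySem.Set.mem_ofList A b).mp hb)]

theorem pv_stats2_items (S A : List Char) (lo hi : Nat) :
    ((PySem.List.enumerate S).foldl (fun d p => if d.contains p.2 then
          d.modify p.2 (0, 0) (fun st => (st.1 + 1, if (lo : Int) ≤ p.1 ∧ p.1 < (hi : Int) then st.2 + 1 else st.2))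
        else d)
      (A.foldl (fun d b => if d.contains b then d else d.insert b ((0 : Int), (0 : Int))) PySem.Dict.empty)).items
      = (PySem.Set.ofList A).map (fun b => (b, ((S.count b : Int), (((S.drop lo).take (hi - lo)).count b : Int)))) := by
  have hkeys : ((PySem.List.enumerate S).foldl (fun d p => if d.contains p.2 then
          d.modify p.2 (0, 0) (fun st => (st.1 + 1, if (lo : Int) ≤ p.1 ∧ p.1 < (hi : Int) then st.2 + 1 else st.2))
        else d)
      (A.foldl (fun d b => if d.contains b then d else d.insert b ((0 : Int), (0 : Int))) PySem.Dict.empty)).keys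
      = PySem.Set.ofList A := by
    rw [pv_phase2_keys, pv_seed_keys, PySem.Dict.keys_empty, PySem.Set.update_nil_left]
  have hnd : ((PySem.List.enumerate S).foldl (fun d p => if d.contains p.2 then
          d.modify p.2 (0, 0) (fun st => (st.1 + 1, if (lo : Int) ≤ p.1 ∧ p.1 < (hi : Int) then st.2 + 1 else st.2))
        else d)
      (A.foldl (fun d b => if d.contains b then d else d.insert b ((0 : Int), (0 : Int))) PySem.Dict.empty)).keys.Nodup := by
    rw [hkeys]; exact PySem.Set.nodup_ofList A
  rw [PySem.Dict.items_eq_map_keys _ hnd ((0 : Int), (0 : Int)), hkeys]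
  apply List.map_congr_left
  intro b hb
  have hbA : b ∈ A := (PySem.Set.mem_ofList A b).mp hb
  have hcont : (A.foldl (fun d b => if d.contains b then d else d.insert b ((0 : Int), (0 : Int))) PySem.Dict.empty).contains b = true := by
    rw [PySem.Dict.contains_iff_mem_keys, pv_seed_keys, PySem.Dict.keys_empty, PySem.Set.update_nil_left]
    exact (PySem.Set.mem_ofList A b).mpr hbA
  rw [pv_phase2_getD _ _ _ _ b hcont,
    pv_seed_getD ((0 : Int), (0 : Int)) A PySem.Dict.empty (fun b => PySem.Dict.getD_empty b _) b,
    pv_countP_enum_total b S 0, pv_countP_enum_window b S 0 (lo : Int) (hi : Int)]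
  simp

theorem pv_core (S A : List Char) (start ter : Int) :
    (A.foldl (fun d base =>
        if ter > start then
          d.insert (String.ofList [base]) ((PySem.Chars.count S [base] : Int),
            (PySem.Chars.count (PySem.List.slice S (some start) (some ter)) [base] : Int),
            (PySem.Chars.count S [base] : Int) - (PySem.Chars.count (PySem.List.slice S (some start) (some ter)) [base] : Int))
        else
          d.insert (String.ofList [base]) ((PySem.Chars.count S [base] : Int),
            (PySem.Chars.count S [base] : Int) - (PySem.Chars.count (PySem.List.slice S (some ter) (some start)) [base] : Int),
            (PySem.Chars.count (PySem.List.slice S (some ter) (some start)) [base] : Int))) PySem.Dict.empty).items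
    =
    (let fwd : Bool := decide (ter > start)
     let lo : Int := if fwd then (PySem.List.clampIdx S.length start : Int) else (PySem.List.clampIdx S.length ter : Int)
     let hi : Int := if fwd then (PySem.List.clampIdx S.length ter : Int) else (PySem.List.clampIdx S.length start : Int)
     let stats : PySem.Dict Char (Int × Int) :=
       A.foldl (fun d b => if d.contains b then d else d.insert b ((0 : Int), (0 : Int))) PySem.Dict.empty
     let stats2 : PySem.Dict Char (Int × Int) :=
       (PySem.List.enumerate S).foldl (fun d p => if d.contains p.2 then
           d.modify p.2 (0, 0) (fun st => (st.1 + 1, if lo ≤ p.1 ∧ p.1 < hi then st.2 + 1 else st.2))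
         else d) stats
     if fwd then stats2.items.map (fun q => (String.ofList [q.1], q.2.1, q.2.2, q.2.1 - q.2.2))
     else stats2.items.map (fun q => (String.ofList [q.1], q.2.1, q.2.1 - q.2.2, q.2.2))) := by
  by_cases hts : ter > start
  · simp only [hts, decide_true, if_true]
    rw [pv_A_items, pv_stats2_items S A (PySem.List.clampIdx S.length start) (PySem.List.clampIdx S.length ter),
      List.map_map]
    apply List.map_congr_left
    intro b _
    simp only [Function.comp]
    rw [pv_count_singleton, pv_count_singleton]
    simp [PySem.List.slice]
  · simp only [hts, decide_false, if_false, Bool.false_eq_true]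
    rw [pv_A_items, pv_stats2_items S A (PySem.List.clampIdx S.length ter) (PySem.List.clampIdx S.length start),
      List.map_map]
    apply List.map_congr_left
    intro b _
    simp only [Function.comp]
    rw [pv_count_singleton, pv_count_singleton]
    simp [PySem.List.slice]

-- ===== VERDICT (by name: the statement is the Claim_ definition above) =====
theorem get_bases_stats_spec : Claim_equal_get_bases_stats := by
  intro sequence alphabet start _
  unfold Spec_get_bases_stats
  simp only [get_bases_stats, get_bases_stats_alt]
  exact pv_core (PySem.Chars.upper sequence.toList) alphabet.toList start _
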